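-- pv_equiv track=rewrite | github.com/Alcatraz-0/Multi-Modal-RAG-for-SEC-10-K-Financial-Document-Analysis | src/qa/math_verifier.py | _detect_calculation_type
-- ===== SOURCE A (Python) =====
-- def _detect_calculation_type(query: str, answer: str) -> str:
--     """Detect type of calculation"""
--     query_lower = query.lower()
--     answer_lower = answer.lower()
--
--     if any(kw in query_lower for kw in ['change', 'difference', 'increase', 'decrease']):
--         return 'difference'
--     elif any(kw in query_lower for kw in ['ratio', 'compared to', 'per']):
--         return 'ratio'
--     elif any(kw in query_lower for kw in ['percentage', '%', 'percent', 'yoy']):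
--         return 'percentage'
--     else:
--         return 'lookup'
-- ===== SOURCE B (Python) =====
-- # Exhaustive keyword scan with a min-priority accumulator: every keyword carries
-- # the priority of its label; we check all keywords and keep the smallest priority
-- # that matches, then map that priority to its label ('lookup' = sentinel 3).
-- _KW_PRIORITY = {
--     'change': 0, 'difference': 0, 'increase': 0, 'decrease': 0,
--     'ratio': 1, 'compared to': 1, 'per': 1,
--     'percentage': 2, '%': 2, 'percent': 2, 'yoy': 2,
-- }
-- _LABELS = ['difference', 'ratio', 'percentage', 'lookup']
--
-- def _detect_calculation_type(query: str, answer: str) -> str: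
--     """Detect type of calculation"""
--     query_lower = query.lower()
--     answer_lower = answer.lower()
--     best = 3
--     for kw, pri in _KW_PRIORITY.items():
--         if pri < best and kw in query_lower:
--             best = pri
--     return _LABELS[best]
-- ===== Notes on version B (the rewrite author's own statement) =====
-- stated objective: alternative
-- what changed: Instead of A's short-circuit if/elif ladder over keyword groups, B scans one flat keyword-to-priority map with a min-priority accumulator over all keywords and indexes the label table by the final minimum.
import Mathlib
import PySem

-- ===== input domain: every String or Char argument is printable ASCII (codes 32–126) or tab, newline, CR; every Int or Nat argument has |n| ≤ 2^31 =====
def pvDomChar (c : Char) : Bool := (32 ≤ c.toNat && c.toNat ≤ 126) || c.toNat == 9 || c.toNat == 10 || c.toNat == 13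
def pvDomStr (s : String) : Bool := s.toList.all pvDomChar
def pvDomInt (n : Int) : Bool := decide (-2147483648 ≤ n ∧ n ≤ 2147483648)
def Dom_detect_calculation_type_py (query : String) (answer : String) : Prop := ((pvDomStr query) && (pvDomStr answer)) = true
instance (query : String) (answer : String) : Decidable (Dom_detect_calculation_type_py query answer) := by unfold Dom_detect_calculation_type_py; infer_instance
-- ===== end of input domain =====

-- B replaces A's short-circuit if/elif ladder by an exhaustive scan of one flat
-- keyword→priority map with a min-priority accumulator, then indexes the label table.


-- ===== PORT A =====
-- literal transliteration of A's if/elif ladder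
def detect_calculation_type_py (query : String) (answer : String) : String :=
  let query_lower := PySem.Str.lower query
  let _answer_lower := PySem.Str.lower answer
  if ["change", "difference", "increase", "decrease"].any (fun kw => PySem.Str.isIn kw query_lower) then
    "difference"
  else if ["ratio", "compared to", "per"].any (fun kw => PySem.Str.isIn kw query_lower) then
    "ratio"
  else if ["percentage", "%", "percent", "yoy"].any (fun kw => PySem.Str.isIn kw query_lower) then
    "percentage"
  else
    "lookup"

-- ===== PORT B =====
-- flat keyword → priority map (a dict with string keys; iterated in insertion order)
def pvKwPriority : List (String × Nat) :=
  [("change", 0), ("difference", 0), ("increase", 0), ("decrease", 0),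
   ("ratio", 1), ("compared to", 1), ("per", 1),
   ("percentage", 2), ("%", 2), ("percent", 2), ("yoy", 2)]

def pvLabels : List String := ["difference", "ratio", "percentage", "lookup"]

def detect_calculation_type_py_alt (query : String) (answer : String) : String :=
  let query_lower := PySem.Str.lower query
  let _answer_lower := PySem.Str.lower answer
  let best := pvKwPriority.foldl
    (fun best p => if best > p.2 && PySem.Str.isIn p.1 query_lower then p.2 else best) 3
  -- _LABELS[best]: best is always in [0,3], so the index is in range
  pvLabels.getD best "lookup"

-- ===== PRECONDITION & SPEC =====
def Spec_detect_calculation_type_py (query : String) (answer : String) (out : String) : Prop := out = detect_calculation_type_py_alt query answer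
instance (query : String) (answer : String) (out : String) : Decidable (Spec_detect_calculation_type_py query answer out) := by unfold Spec_detect_calculation_type_py; infer_instance

-- ===== CLAIM (what is proved, stated in full; the proofs are below) =====
def Claim_equal_detect_calculation_type_py : Prop := ∀ (query : String) (answer : String), Dom_detect_calculation_type_py query answer → Spec_detect_calculation_type_py query answer (detect_calculation_type_py query answer)

-- ===== LEMMAS AND PROOFS =====

-- ===== VERDICT (by name: the statement is the Claim_ definition above) =====
set_option maxHeartbeats 2000000 in
theorem detect_calculation_type_py_spec : Claim_equal_detect_calculation_type_py := by
  intro query answer _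
  unfold Spec_detect_calculation_type_py detect_calculation_type_py detect_calculation_type_py_alt pvKwPriority pvLabels
  rcases Bool.eq_false_or_eq_true (PySem.Str.isIn "change" (PySem.Str.lower query)) with h1 | h1
  · simp_all
  · -- "change" not in query_lower
    rcases Bool.eq_false_or_eq_true (PySem.Str.isIn "difference" (PySem.Str.lower query)) with h2 | h2
    · simp_all
    · -- "difference" not in query_lower
      rcases Bool.eq_false_or_eq_true (PySem.Str.isIn "increase" (PySem.Str.lower query)) with h3 | h3
      · simp_all
      · -- "increase" not in query_lower
        rcases Bool.eq_false_or_eq_true (PySem.Str.isIn "decrease" (PySem.Str.lower query)) with h4 | h4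
        · simp_all
        · -- "decrease" not in query_lower
          rcases Bool.eq_false_or_eq_true (PySem.Str.isIn "ratio" (PySem.Str.lower query)) with h5 | h5
          · simp_all
          · -- "ratio" not in query_lower
            rcases Bool.eq_false_or_eq_true (PySem.Str.isIn "compared to" (PySem.Str.lower query)) with h6 | h6
            · simp_all
            · -- "compared to" not in query_lower
              rcases Bool.eq_false_or_eq_true (PySem.Str.isIn "per" (PySem.Str.lower query)) with h7 | h7
              · simp_all
              · -- "per" not in query_lower
                rcases Bool.eq_false_or_eq_true (PySem.Str.isIn "percentage" (PySem.Str.lower query)) with h8 | h8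
                · simp_all
                · -- "percentage" not in query_lower
                  rcases Bool.eq_false_or_eq_true (PySem.Str.isIn "%" (PySem.Str.lower query)) with h9 | h9
                  · simp_all
                  · -- "%" not in query_lower
                    rcases Bool.eq_false_or_eq_true (PySem.Str.isIn "percent" (PySem.Str.lower query)) with h10 | h10
                    · simp_all
                    · -- "percent" not in query_lower
                      rcases Bool.eq_false_or_eq_true (PySem.Str.isIn "yoy" (PySem.Str.lower query)) with h11 | h11
                      · simp_all
                      · -- "yoy" not in query_lower
                        simp_all
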